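-- pv_equiv track=rewrite | github.com/hamzamooraj99/Python-CW | py_cw.py | iadd
-- ===== SOURCE A (Python) =====
-- def iadd(I,J,count=0,rem=0):
--     if(I == [] and J == []): #Case if both I and J are empty(i.e. 0)
--         return []
--
--     elif(I==[] or J==[]): #Case if either I or J is empty(i.e. 0)
--         if(I == []): #Case: I is empty
--             return J
--         else: #Case: J is empty
--             return I
--
--     else: #Case: Neither I nor J are empty
--         odd = len(I) - len(J) #Calculate difference in length of I and J in case one has more elements than the other
--
--         if(odd > 0): #If odd is > 0, that means I has more elements than J
--             J += [0] * odd #Add [0] odd amount of times to J so that I and J are of equal length now - This would be the same as adding 0s in front of an integer (7 == 07 and 134 == 0134)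
--             return iadd(I,J) #Restart function with I and J having equal lengths
--
--         elif(odd < 0): #If odd is < 0, that means J has more elements than I
--             odd *= -1 #Cancel out negative to allow for multiplication below
--             I += [0] * odd
--             return iadd(I,J)
--
--         #We make all changes to I... Can be done with J as well..
--         elif(odd == 0): #If odd == 0 then I and J have equal lengths. If function is restarted above, then I and J will have equal lengths and skip first two if cases.
--             #Base Case
--             if(count >= len(I)): #Keep a count to allow us to have a base case for recursion - If count surpasses len(I), then that means function has been applied to all elements in I and J
--                 if(rem == 0): #This if..else statement is to check that rem is 0 or not. If rem is not 0 at the base case, then that means the answer has one more digit than I and J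
--                     return I
--                 else:
--                     I.append(rem)
--                     return I
--
--             x = list(zip(I, J)) #Creates a list with elements in I and J with the same order "tupled" together
--             x[count] = sum(x[count]) + rem #rem is the remainder that is carried forward from previous recursive step(initially rem is 0)
--             #Recursive case
--             if(x[count] > 9): #If sum ends up being greater than 9, then we have to increment rem, which is done in recursive step
--                 x[count] -= 10
--                 I[count] = x[count]
--                 return iadd(I,J, count+1, rem=1)
--             else:
--                 I[count] = x[count]
--                 return iadd(I,J, count+1, rem=0)
-- ===== SOURCE B (Python) =====
-- def iadd(I, J, count=0, rem=0):
--     # Single forward pass with a carry; no recursion, no zip rebuilt per digit.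
--     # (Return-value equivalent to A; unlike A it does not mutate I or J in place.)
--     if not I:
--         return J
--     if not J:
--         return I
--     if len(I) != len(J):
--         # A restarts from scratch after padding, discarding count/rem.
--         n = max(len(I), len(J))
--         I = I + [0] * (n - len(I))
--         J = J + [0] * (n - len(J))
--         count, rem = 0, 0
--     out = list(I)
--     carry = rem
--     for k in range(max(count, 0), len(out)):
--         s = out[k] + J[k] + carry
--         if s > 9:
--             out[k] = s - 10
--             carry = 1
--         else:
--             out[k] = s
--             carry = 0
--     if carry != 0:
--         out.append(carry)
--     return out
-- ===== Notes on version B (the rewrite author's own statement) =====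
-- stated objective: faster
-- what changed: Replaces A's per-digit recursion (which re-pads and rebuilds list(zip(I,J)) on every step) with one iterative forward pass that keeps a single carry variable.
-- outside the precondition, e.g. on iadd([1, 2], [3, 4], -2, 1): A returns [8, 0, 1], B returns [5, 6]; on iadd([0], [0], -1, 0): A returns [0], B returns [0]
import Mathlib
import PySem

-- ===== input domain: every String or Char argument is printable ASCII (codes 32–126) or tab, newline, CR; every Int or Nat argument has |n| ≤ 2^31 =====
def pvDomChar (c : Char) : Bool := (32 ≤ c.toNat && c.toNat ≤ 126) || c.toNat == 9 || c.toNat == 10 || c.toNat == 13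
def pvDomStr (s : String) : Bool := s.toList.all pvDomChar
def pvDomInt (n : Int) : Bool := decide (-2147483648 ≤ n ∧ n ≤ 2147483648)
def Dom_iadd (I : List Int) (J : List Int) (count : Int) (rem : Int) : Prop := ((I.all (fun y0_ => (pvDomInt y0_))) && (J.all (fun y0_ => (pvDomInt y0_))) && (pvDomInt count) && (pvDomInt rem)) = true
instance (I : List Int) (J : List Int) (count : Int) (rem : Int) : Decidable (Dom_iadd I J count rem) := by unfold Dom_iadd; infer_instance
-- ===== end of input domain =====

-- B replaces A's per-digit recursion (which re-pads and rebuilds list(zip(I,J)) on every step)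
-- with one iterative forward pass keeping a single carry variable (objective: faster).
-- Equivalence is about the RETURN value only: A mutates I/J in place, B does not.

-- ===== PORT A =====
-- A's recursion, made total with a fuel parameter (`iadd` below passes enough fuel that the
-- 0 case is never reached: A recurses at most once for re-padding plus once per digit).
def iaddGas (gas : Nat) (I : List Int) (J : List Int) (count : Int) (rem : Int) : List Int :=
  match gas with
  | 0 => []
  | g + 1 =>
    if I = [] ∧ J = [] then []
    else if I = [] ∨ J = [] then
      if I = [] then J else I
    else
      let odd : Int := (I.length : Int) - (J.length : Int)
      if odd > 0 then iaddGas g I (J ++ List.replicate (I.length - J.length) 0) 0 0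
      else if odd < 0 then iaddGas g (I ++ List.replicate (J.length - I.length) 0) J 0 0
      else
        if count ≥ (I.length : Int) then
          if rem = 0 then I else I ++ [rem]
        else
          match PySem.List.pyGet? (I.zip J) count with
          | none => []   -- x[count] raises IndexError in Python; these inputs are excluded by Pre_iadd
          | some p =>
            let s := p.1 + p.2 + rem
            if s > 9 then iaddGas g (PySem.List.pySetD I count (s - 10)) J (count + 1) 1
            else iaddGas g (PySem.List.pySetD I count s) J (count + 1) 0

def iadd (I : List Int) (J : List Int) (count : Int) (rem : Int) : List Int :=
  iaddGas (I.length + J.length + 2 + (((max I.length J.length : Nat) : Int) - count).toNat) I J count rem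

-- ===== PORT B =====
def iadd_alt (I : List Int) (J : List Int) (count : Int) (rem : Int) : List Int :=
  if I = [] then J
  else if J = [] then I
  else
    let n := max I.length J.length
    match (if I.length ≠ J.length then
             (I ++ List.replicate (n - I.length) 0, J ++ List.replicate (n - J.length) 0, (0 : Int), (0 : Int))
           else (I, J, count, rem)) with
    | (I', J', count', rem') =>
      -- the for-loop over range(max(count,0), len(out)) with state (out, carry)
      let p := (PySem.List.pyRange (max count' 0) (I'.length : Int) 1).foldl
        (fun (st : List Int × Int) k =>
          let s := PySem.List.pyGetD st.1 k 0 + PySem.List.pyGetD J' k 0 + st.2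
          if s > 9 then (PySem.List.pySetD st.1 k (s - 10), 1)
          else (PySem.List.pySetD st.1 k s, 0))
        (I', rem')
      if p.2 ≠ 0 then p.1 ++ [p.2] else p.1

-- ===== PRECONDITION & SPEC =====
-- Pre_ excludes calls on equal-length nonempty lists with a negative count: for count < -len(I)
-- A raises IndexError, and for -len(I) <= count < 0 Python's negative-index wraparound makes A
-- add the trailing digits twice before restarting at 0 -- an accidental value of the
-- recursion-internal start parameter; B starts at digit 0 there.
def Pre_iadd (I : List Int) (J : List Int) (count : Int) (rem : Int) : Prop :=
  ¬ (I ≠ [] ∧ J ≠ [] ∧ I.length = J.length ∧ count < 0)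
instance (I : List Int) (J : List Int) (count : Int) (rem : Int) : Decidable (Pre_iadd I J count rem) := by unfold Pre_iadd; infer_instance

def pvWitness_iadd : List Int × List Int × Int × Int := ([1, 2], [3, 4], 0, 0)

def Spec_iadd (I : List Int) (J : List Int) (count : Int) (rem : Int) (out : List Int) : Prop :=
  out = iadd_alt I J count rem
instance (I : List Int) (J : List Int) (count : Int) (rem : Int) (out : List Int) : Decidable (Spec_iadd I J count rem out) := by unfold Spec_iadd; infer_instance

-- ===== CLAIM (what is proved, stated in full; the proofs are below) =====
def Claim_equal_iadd : Prop := ∀ (I : List Int) (J : List Int) (count : Int) (rem : Int), Dom_iadd I J count rem → Pre_iadd I J count rem → Spec_iadd I J count rem (iadd I J count rem)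

-- ===== LEMMAS AND PROOFS =====

-- the body of B's loop, named for the proofs (identical to the lambda in iadd_alt)
def altStep (J : List Int) (st : List Int × Int) (k : Int) : List Int × Int :=
  let s := PySem.List.pyGetD st.1 k 0 + PySem.List.pyGetD J k 0 + st.2
  if s > 9 then (PySem.List.pySetD st.1 k (s - 10), 1)
  else (PySem.List.pySetD st.1 k s, 0)

-- B's loop-then-append tail, as a function of the start index
def altLoop (J I : List Int) (start rem : Int) : List Int :=
  let p := (PySem.List.pyRange start (I.length : Int) 1).foldl (altStep J) (I, rem)
  if p.2 ≠ 0 then p.1 ++ [p.2] else p.1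

lemma gas_core (g : Nat) (I J : List Int) (count rem : Int) (hI : I ≠ []) (hJ : J ≠ [])
    (hlen : I.length = J.length) (hc : 0 ≤ count) (hg : ((I.length : Int) - count).toNat < g) :
    iaddGas g I J count rem = altLoop J I count rem := by
  induction g generalizing I count rem with
  | zero => omega
  | succ g ih =>
    rw [iaddGas]
    rw [if_neg (by simp [hI]), if_neg (by simp [hI, hJ])]
    simp only []
    rw [if_neg (by omega), if_neg (by omega)]
    by_cases hge : count ≥ (I.length : Int)
    · rw [if_pos hge]
      unfold altLoop
      rw [PySem.List.pyRange_one_eq_nil (by omega)]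
      simp only [List.foldl_nil]
      by_cases hr : rem = 0
      · simp [hr]
      · simp [hr]
    · rw [if_neg hge]
      have hcz : count.toNat < (I.zip J).length := by simp [List.length_zip]; omega
      have hget : PySem.List.pyGet? (I.zip J) count = some ((I.zip J)[count.toNat]) := by
        rw [PySem.List.pyGet?_of_nonneg _ hc, List.getElem?_eq_getElem hcz]
      rw [hget]
      simp only [List.getElem_zip]
      -- unroll one iteration of B's loop
      unfold altLoop
      rw [PySem.List.pyRange_one_cons (by omega), List.foldl_cons]
      have hstep : altStep J (I, rem) count =
          (if I[count.toNat]'(by omega) + J[count.toNat]'(by omega) + rem > 9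
            then (I.set count.toNat (I[count.toNat]'(by omega) + J[count.toNat]'(by omega) + rem - 10), (1 : Int))
            else (I.set count.toNat (I[count.toNat]'(by omega) + J[count.toNat]'(by omega) + rem), (0 : Int))) := by
        unfold altStep
        rw [show PySem.List.pyGetD I count 0 = I[count.toNat]'(by omega) from
              PySem.List.pyGetD_eq_getElem _ _ hc (by omega),
            show PySem.List.pyGetD J count 0 = J[count.toNat]'(by omega) from
              PySem.List.pyGetD_eq_getElem _ _ hc (by omega)]
        simp only []
        split_ifs with h
        · rw [PySem.List.pySetD_of_nonneg _ _ hc]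
        · rw [PySem.List.pySetD_of_nonneg _ _ hc]
      rw [hstep]
      by_cases hs : I[count.toNat]'(by omega) + J[count.toNat]'(by omega) + rem > 9
      · rw [if_pos hs, if_pos hs, PySem.List.pySetD_of_nonneg _ _ hc,
          ih (I.set count.toNat _) (count + 1) 1 (by simp [hI]) (by simp [hlen]) (by omega) (by rw [List.length_set]; omega)]
        unfold altLoop
        simp [List.length_set]
      · rw [if_neg hs, if_neg hs, PySem.List.pySetD_of_nonneg _ _ hc,
          ih (I.set count.toNat _) (count + 1) 0 (by simp [hI]) (by simp [hlen]) (by omega) (by rw [List.length_set]; omega)]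
        unfold altLoop
        simp [List.length_set]

lemma main_eq (I J : List Int) (count rem : Int) (hpre : Pre_iadd I J count rem) :
    iadd I J count rem = iadd_alt I J count rem := by
  unfold iadd
  obtain ⟨g, hg⟩ : ∃ g, I.length + J.length + 2 + (((max I.length J.length : Nat) : Int) - count).toNat = g + 1 :=
    ⟨I.length + J.length + 1 + (((max I.length J.length : Nat) : Int) - count).toNat, by omega⟩
  rw [hg]
  by_cases hI : I = []
  · subst hI
    rw [iaddGas, iadd_alt.eq_def]
    by_cases hJ : J = [] <;> simp [hJ]
  · by_cases hJ : J = []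
    · subst hJ
      rw [iaddGas, iadd_alt.eq_def]
      simp [hI]
    · by_cases hlen : I.length = J.length
      · have hmax : max I.length J.length = I.length := by omega
        rw [hmax] at hg
        have hc : 0 ≤ count := by
          unfold Pre_iadd at hpre
          by_contra h
          exact hpre ⟨hI, hJ, hlen, by omega⟩
        rw [gas_core (g + 1) I J count rem hI hJ hlen hc (by omega)]
        rw [iadd_alt.eq_def, if_neg hI, if_neg hJ]
        simp only []
        rw [if_neg (show ¬(I.length ≠ J.length) by omega),
          show max count 0 = count from by omega]
        rfl
      · rw [iaddGas, if_neg (by simp [hI]), if_neg (by simp [hI, hJ])]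
        simp only []
        rw [iadd_alt.eq_def, if_neg hI, if_neg hJ]
        simp only []
        rw [if_pos hlen]
        by_cases hgt : J.length < I.length
        · have hmax : max I.length J.length = I.length := by omega
          rw [hmax] at hg
          rw [if_pos (by omega)]
          rw [gas_core g I (J ++ List.replicate (I.length - J.length) 0) 0 0 hI
            (by simp [hJ]) (by simp; omega) le_rfl (by simp; omega)]
          show altLoop (J ++ List.replicate (I.length - J.length) 0) I 0 0 =
            altLoop (J ++ List.replicate (max I.length J.length - J.length) 0)
              (I ++ List.replicate (max I.length J.length - I.length) 0) (max 0 0) 0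
          rw [hmax]
          simp
        · have hmax : max I.length J.length = J.length := by omega
          rw [hmax] at hg
          rw [if_neg (by omega), if_pos (by omega)]
          rw [gas_core g (I ++ List.replicate (J.length - I.length) 0) J 0 0
            (by simp [hI]) hJ (by simp; omega) le_rfl (by simp; omega)]
          show altLoop J (I ++ List.replicate (J.length - I.length) 0) 0 0 =
            altLoop (J ++ List.replicate (max I.length J.length - J.length) 0)
              (I ++ List.replicate (max I.length J.length - I.length) 0) (max 0 0) 0
          rw [hmax]
          simp

-- ===== VERDICT (by name: the statement is the Claim_ definition above) =====
theorem iadd_spec : Claim_equal_iadd := by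
  intro I J count rem _ hpre
  exact main_eq I J count rem hpre
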